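-- pv_equiv track=rewrite | github.com/devHanif-git/productivityHelper | src/utils/semester_logic.py | get_all_breaks
-- ===== SOURCE A (Python) =====
-- from typing import Optional, Union, Tuple
--
-- BREAK_MID_SEMESTER = "mid_semester"
--
-- BREAK_INTER_SEMESTER = "inter_semester"
--
-- def classify_break_event(event: dict) -> str:
--     """
--     Classify a break event as mid-semester or inter-semester.
--
--     Args:
--         event: The event dict with 'name' and 'name_en' fields.
--
--     Returns:
--         'mid_semester' or 'inter_semester' based on event name.
--     """
--     name = (event.get("name") or "").lower()
--     name_en = (event.get("name_en") or "").lower()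
--
--     # Check for mid-semester break keywords
--     if "pertengahan" in name or "mid" in name_en:
--         return BREAK_MID_SEMESTER
--
--     # Check for inter-semester break keywords
--     if "antara" in name or "inter" in name_en or "semester break" in name_en:
--         return BREAK_INTER_SEMESTER
--
--     # Default: assume inter-semester if it comes after mid-semester
--     return BREAK_INTER_SEMESTER
--
-- def get_all_breaks(events: list[dict]) -> Tuple[Optional[dict], Optional[dict]]:
--     """
--     Get mid-semester and inter-semester break events.
--
--     Args:
--         events: List of academic events.
--
--     Returns:
--         Tuple of (mid_semester_break, inter_semester_break) event dicts.
--     """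
--     mid_break = None
--     inter_break = None
--
--     for event in events:
--         if event.get("event_type") == "break":
--             break_type = classify_break_event(event)
--             if break_type == BREAK_MID_SEMESTER and mid_break is None:
--                 mid_break = event
--             elif break_type == BREAK_INTER_SEMESTER and inter_break is None:
--                 inter_break = event
--
--     return mid_break, inter_break
-- ===== SOURCE B (Python) =====
-- BREAK_MID_SEMESTER = "mid_semester"
-- BREAK_INTER_SEMESTER = "inter_semester"
--
--
-- def classify_break_event(event: dict) -> str:
--     name = (event.get("name") or "").lower()
--     name_en = (event.get("name_en") or "").lower()
--     if "pertengahan" in name or "mid" in name_en: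
--         return BREAK_MID_SEMESTER
--     if "antara" in name or "inter" in name_en or "semester break" in name_en:
--         return BREAK_INTER_SEMESTER
--     return BREAK_INTER_SEMESTER
--
--
-- def get_all_breaks(events):
--     def first_break_of(kind):
--         return next(
--             (e for e in events
--              if e.get("event_type") == "break" and classify_break_event(e) == kind),
--             None,
--         )
--
--     return first_break_of(BREAK_MID_SEMESTER), first_break_of(BREAK_INTER_SEMESTER)
-- ===== Notes on version B (the rewrite author's own statement) =====
-- stated objective: simpler
-- what changed: Replaces the single accumulator loop threading two first-seen flags with two independent first-match searches (next over a filtering generator), one per break type.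
import Mathlib
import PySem

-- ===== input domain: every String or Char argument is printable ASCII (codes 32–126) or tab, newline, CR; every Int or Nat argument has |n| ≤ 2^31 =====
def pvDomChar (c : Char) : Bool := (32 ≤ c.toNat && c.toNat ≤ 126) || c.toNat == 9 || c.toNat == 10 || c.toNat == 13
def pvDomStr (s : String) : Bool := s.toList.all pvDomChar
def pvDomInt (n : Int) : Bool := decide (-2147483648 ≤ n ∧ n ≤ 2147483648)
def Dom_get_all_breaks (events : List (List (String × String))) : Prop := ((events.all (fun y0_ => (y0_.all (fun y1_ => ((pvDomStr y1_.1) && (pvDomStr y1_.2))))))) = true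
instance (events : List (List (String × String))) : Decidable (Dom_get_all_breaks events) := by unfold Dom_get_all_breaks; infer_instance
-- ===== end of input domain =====

-- B replaces A's single accumulator loop (two first-seen flags threaded through one pass)
-- with two independent first-match searches, one per break type; same results, same O(n) cost.


-- ===== PORT A =====
-- event.get("name") or "": the only falsy str is "", so this is getD with default "".
def classify_break_event (event : List (String × String)) : String :=
  let d := PySem.Dict.mk event
  let name := PySem.Str.lower (PySem.Dict.getD d "name" "")
  let name_en := PySem.Str.lower (PySem.Dict.getD d "name_en" "")
  if PySem.Str.isIn "pertengahan" name || PySem.Str.isIn "mid" name_en then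
    "mid_semester"
  else if PySem.Str.isIn "antara" name || PySem.Str.isIn "inter" name_en
      || PySem.Str.isIn "semester break" name_en then
    "inter_semester"
  else
    "inter_semester"

-- the body of A's for-loop, as one step of the fold
def get_all_breaks_step (st : (Option (List (String × String))) × (Option (List (String × String))))
    (event : List (String × String)) : (Option (List (String × String))) × (Option (List (String × String))) :=
  if PySem.Dict.get? (PySem.Dict.mk event) "event_type" == some "break" then
    let break_type := classify_break_event event
    if break_type == "mid_semester" && st.1 == none then (some event, st.2)
    else if break_type == "inter_semester" && st.2 == none then (st.1, some event)
    else st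
  else st

def get_all_breaks (events : List (List (String × String))) : (Option (List (String × String))) × (Option (List (String × String))) :=
  events.foldl get_all_breaks_step (none, none)

-- ===== PORT B =====
def is_break (event : List (String × String)) : Bool :=
  PySem.Dict.get? (PySem.Dict.mk event) "event_type" == some "break"

def first_break_of (events : List (List (String × String))) (kind : String) : Option (List (String × String)) :=
  events.find? (fun e => is_break e && (classify_break_event e == kind))

def get_all_breaks_alt (events : List (List (String × String))) : (Option (List (String × String))) × (Option (List (String × String))) :=
  (first_break_of events "mid_semester", first_break_of events "inter_semester")

-- ===== PRECONDITION & SPEC =====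
def Spec_get_all_breaks (events : List (List (String × String))) (out : (Option (List (String × String))) × (Option (List (String × String)))) : Prop := out = get_all_breaks_alt events
instance (events : List (List (String × String))) (out : (Option (List (String × String))) × (Option (List (String × String)))) : Decidable (Spec_get_all_breaks events out) := by unfold Spec_get_all_breaks; infer_instance

-- ===== CLAIM (what is proved, stated in full; the proofs are below) =====
def Claim_equal_get_all_breaks : Prop := ∀ (events : List (List (String × String))), Dom_get_all_breaks events → Spec_get_all_breaks events (get_all_breaks events)

-- ===== LEMMAS AND PROOFS =====

theorem classify_dichotomy (e : List (String × String)) :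
    classify_break_event e = "mid_semester" ∨ classify_break_event e = "inter_semester" := by
  unfold classify_break_event
  dsimp only
  split_ifs <;> simp

-- A's loop, started from any state, fills each missing slot with the first match of its type.
theorem foldl_char (events : List (List (String × String)))
    (mid inter : Option (List (String × String))) :
    events.foldl get_all_breaks_step (mid, inter)
    = (mid.or (first_break_of events "mid_semester"),
       inter.or (first_break_of events "inter_semester")) := by
  induction events generalizing mid inter with
  | nil => simp [first_break_of]
  | cons e rest ih =>
    rw [List.foldl_cons]
    by_cases hb : is_break e
    · have hb' := hb
      simp only [is_break] at hb'
      rcases classify_dichotomy e with hc | hc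
      · have hstep : get_all_breaks_step (mid, inter) e
            = (mid.or (some e), inter) := by
          cases mid <;> simp [get_all_breaks_step, hb', hc]
        rw [hstep, ih]
        simp [first_break_of, is_break, hb', hc]
      · have hstep : get_all_breaks_step (mid, inter) e
            = (mid, inter.or (some e)) := by
          cases inter <;> simp [get_all_breaks_step, hb', hc]
        rw [hstep, ih]
        simp [first_break_of, is_break, hb', hc]
    · have hb' : (PySem.Dict.get? (PySem.Dict.mk e) "event_type" == some "break") = false := by
        simpa [is_break] using hb
      have hstep : get_all_breaks_step (mid, inter) e = (mid, inter) := by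
        simp [get_all_breaks_step, hb']
      rw [hstep, ih]
      simp [first_break_of, is_break, hb']

-- ===== VERDICT (by name: the statement is the Claim_ definition above) =====
theorem get_all_breaks_spec : Claim_equal_get_all_breaks := by
  intro events _
  unfold Spec_get_all_breaks get_all_breaks get_all_breaks_alt
  simpa using foldl_char events none none
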